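-- pv_equiv track=rewrite | github.com/BigMe123/BRGSentimentbot | sentiment_bot/consensus/dynamic_alpha.py | format_reason_codes
-- ===== SOURCE A (Python) =====
-- from typing import Dict, List, Optional, Tuple, Union
--
-- def format_reason_codes(reason_codes: List[str]) -> str:
--     """
--     Format reason codes into human-readable explanation
--     """
--     if not reason_codes:
--         return "No specific reasoning available"
--
--     # Readable mappings
--     reason_map = {
--         'ml_model_prediction': 'ML model prediction',
--         'fallback_rules': 'Rule-based fallback',
--         'high_confidence': 'High model confidence',
--         'very_high_confidence': 'Very high model confidence',
--         'low_confidence': 'Low model confidence',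
--         'medium_confidence': 'Medium model confidence',
--         'high_confidence_boost': 'Confidence boost applied',
--         'low_confidence_penalty': 'Confidence penalty applied',
--         'high_consensus_disagreement': 'High consensus disagreement',
--         'medium_consensus_disagreement': 'Medium consensus disagreement',
--         'low_consensus_disagreement': 'Low consensus disagreement',
--         'high_dispersion_caution': 'Caution due to high dispersion',
--         'high_macro_volatility': 'High macro volatility',
--         'very_high_macro_volatility': 'Very high macro volatility',
--         'low_macro_volatility': 'Low macro volatility',
--         'high_volatility_conservative': 'Conservative due to volatility',
--         'developed_market': 'Developed market',
--         'emerging_market': 'Emerging market',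
--         'developed_market_bias': 'DM bias applied',
--         'commodity_exporter': 'Commodity exporter',
--         'high_china_exposure': 'High China exposure',
--         'high_model_weight': 'High model weight (α>0.7)',
--         'high_consensus_weight': 'High consensus weight (α<0.3)',
--         'balanced_blending': 'Balanced model-consensus blend',
--         'high_dispersion_low_confidence': 'High dispersion + low confidence → consensus',
--         'persistent_large_gap': 'Persistent large gap → reduced weight',
--         'election_uncertainty': 'Election uncertainty → conservative',
--         'commodity_volatility': 'Commodity volatility → conservative',
--         'crisis_mode_detected': 'Crisis mode → heavy consensus bias',
--         'model_breakdown': 'Model breakdown → minimal model weight',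
--         'consensus_breakdown': 'Consensus breakdown → equal weighting',
--         'em_stress_conditions': 'EM stress → conservative blending',
--         'extreme_depression_cap': 'Extreme recession forecast capped',
--         'extreme_boom_cap': 'Extreme growth forecast capped',
--         'deep_recession_caution': 'Deep recession → consensus preference',
--         'high_growth_outlier': 'High growth outlier → conservative'
--     }
--
--     # Convert to readable format
--     readable_reasons = []
--     for reason in reason_codes:
--         if reason.startswith('raw_alpha_'):
--             alpha_val = reason.split('_')[-1]
--             readable_reasons.append(f"Raw α={alpha_val}")
--         elif reason.startswith('min_bound_applied_'):
--             bound_val = reason.split('_')[-1]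
--             readable_reasons.append(f"Min α={bound_val} applied")
--         elif reason.startswith('max_bound_applied_'):
--             bound_val = reason.split('_')[-1]
--             readable_reasons.append(f"Max α={bound_val} applied")
--         else:
--             readable_reasons.append(reason_map.get(reason, reason.replace('_', ' ').title()))
--
--     # Group into key categories for display
--     key_reasons = []
--     if any('ML model' in r or 'Raw α' in r for r in readable_reasons):
--         key_reasons.append('🤖 ML-driven')
--     if any('fallback' in r.lower() for r in readable_reasons):
--         key_reasons.append('📋 Rule-based')
--     if any('consensus' in r.lower() for r in readable_reasons):
--         key_reasons.append('🎯 Consensus-aware')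
--     if any('volatility' in r.lower() or 'conservative' in r.lower() for r in readable_reasons):
--         key_reasons.append('⚠️ Risk-adjusted')
--     if any('crisis' in r.lower() or 'breakdown' in r.lower() or 'extreme' in r.lower() or 'cap' in r.lower() for r in readable_reasons):
--         key_reasons.append('🚨 Guardrails')
--
--     # Return compact summary with top 3 specific reasons
--     summary = ' + '.join(key_reasons) if key_reasons else 'Standard'
--     top_specifics = [r for r in readable_reasons if not any(x in r for x in ['ML model', 'fallback', 'Raw α'])][:3]
--
--     if top_specifics:
--         return f"{summary}: {', '.join(top_specifics)}"
--     else: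
--         return summary
-- ===== SOURCE B (Python) =====
-- _REASON_MAP = {
--     'ml_model_prediction': 'ML model prediction',
--     'fallback_rules': 'Rule-based fallback',
--     'high_confidence': 'High model confidence',
--     'very_high_confidence': 'Very high model confidence',
--     'low_confidence': 'Low model confidence',
--     'medium_confidence': 'Medium model confidence',
--     'high_confidence_boost': 'Confidence boost applied',
--     'low_confidence_penalty': 'Confidence penalty applied',
--     'high_consensus_disagreement': 'High consensus disagreement',
--     'medium_consensus_disagreement': 'Medium consensus disagreement',
--     'low_consensus_disagreement': 'Low consensus disagreement',
--     'high_dispersion_caution': 'Caution due to high dispersion',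
--     'high_macro_volatility': 'High macro volatility',
--     'very_high_macro_volatility': 'Very high macro volatility',
--     'low_macro_volatility': 'Low macro volatility',
--     'high_volatility_conservative': 'Conservative due to volatility',
--     'developed_market': 'Developed market',
--     'emerging_market': 'Emerging market',
--     'developed_market_bias': 'DM bias applied',
--     'commodity_exporter': 'Commodity exporter',
--     'high_china_exposure': 'High China exposure',
--     'high_model_weight': 'High model weight (α>0.7)',
--     'high_consensus_weight': 'High consensus weight (α<0.3)',
--     'balanced_blending': 'Balanced model-consensus blend',
--     'high_dispersion_low_confidence': 'High dispersion + low confidence → consensus',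
--     'persistent_large_gap': 'Persistent large gap → reduced weight',
--     'election_uncertainty': 'Election uncertainty → conservative',
--     'commodity_volatility': 'Commodity volatility → conservative',
--     'crisis_mode_detected': 'Crisis mode → heavy consensus bias',
--     'model_breakdown': 'Model breakdown → minimal model weight',
--     'consensus_breakdown': 'Consensus breakdown → equal weighting',
--     'em_stress_conditions': 'EM stress → conservative blending',
--     'extreme_depression_cap': 'Extreme recession forecast capped',
--     'extreme_boom_cap': 'Extreme growth forecast capped',
--     'deep_recession_caution': 'Deep recession → consensus preference',
--     'high_growth_outlier': 'High growth outlier → conservative',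
-- }
--
--
-- def _readable(reason):
--     if reason.startswith('raw_alpha_'):
--         return "Raw α=" + reason.split('_')[-1]
--     if reason.startswith('min_bound_applied_'):
--         return "Min α=" + reason.split('_')[-1] + " applied"
--     if reason.startswith('max_bound_applied_'):
--         return "Max α=" + reason.split('_')[-1] + " applied"
--     return _REASON_MAP.get(reason, reason.replace('_', ' ').title())
--
--
-- def format_reason_codes(reason_codes):
--     if not reason_codes:
--         return "No specific reasoning available"
--
--     ml = rule = cons = risk = guard = False
--     specifics = []
--     for code in reason_codes:
--         r = _readable(code)
--         low = r.lower()
--         ml = ml or 'ML model' in r or 'Raw α' in r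
--         rule = rule or 'fallback' in low
--         cons = cons or 'consensus' in low
--         risk = risk or 'volatility' in low or 'conservative' in low
--         guard = guard or 'crisis' in low or 'breakdown' in low or 'extreme' in low or 'cap' in low
--         if 'ML model' not in r and 'fallback' not in r and 'Raw α' not in r:
--             specifics.append(r)
--
--     key_reasons = []
--     if ml:
--         key_reasons.append('🤖 ML-driven')
--     if rule:
--         key_reasons.append('📋 Rule-based')
--     if cons:
--         key_reasons.append('🎯 Consensus-aware')
--     if risk:
--         key_reasons.append('⚠️ Risk-adjusted')
--     if guard:
--         key_reasons.append('🚨 Guardrails')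
--
--     summary = ' + '.join(key_reasons) if key_reasons else 'Standard'
--     top_specifics = specifics[:3]
--     if top_specifics:
--         return summary + ": " + ', '.join(top_specifics)
--     return summary
-- ===== Notes on version B (the rewrite author's own statement) =====
-- stated objective: alternative
-- what changed: A maps the codes to a readable list and then scans that list seven more times (five any() category scans, a specifics comprehension, plus the initial map); B computes each code's readable form once in a single fused pass that simultaneously updates five category flags and the specifics list, then assembles the identical summary.
import Mathlib
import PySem

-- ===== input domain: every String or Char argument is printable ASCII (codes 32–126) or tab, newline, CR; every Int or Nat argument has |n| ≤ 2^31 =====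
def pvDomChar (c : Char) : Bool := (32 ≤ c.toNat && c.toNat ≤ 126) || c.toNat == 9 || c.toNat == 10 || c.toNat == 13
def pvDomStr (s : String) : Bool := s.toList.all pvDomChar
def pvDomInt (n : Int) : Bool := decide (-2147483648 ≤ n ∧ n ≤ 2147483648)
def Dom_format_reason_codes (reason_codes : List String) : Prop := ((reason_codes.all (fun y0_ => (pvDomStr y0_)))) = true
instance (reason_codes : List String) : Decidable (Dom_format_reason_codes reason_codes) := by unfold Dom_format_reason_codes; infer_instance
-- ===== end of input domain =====

-- B fuses A's four list passes (readable map, five `any` scans, specifics comprehension) into one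
-- loop carrying five category flags and the specifics list; same return value, objective: alternative
-- (single-pass) decomposition.

-- Shared per-element helpers: the reason_map dict literal and the per-reason readable form,
-- identical in Source A and Source B (Source B's _readable / _REASON_MAP).
def pvReasonMap : PySem.Dict String String := PySem.Dict.ofList
  [("ml_model_prediction", "ML model prediction"),
   ("fallback_rules", "Rule-based fallback"),
   ("high_confidence", "High model confidence"),
   ("very_high_confidence", "Very high model confidence"),
   ("low_confidence", "Low model confidence"),
   ("medium_confidence", "Medium model confidence"),
   ("high_confidence_boost", "Confidence boost applied"),
   ("low_confidence_penalty", "Confidence penalty applied"),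
   ("high_consensus_disagreement", "High consensus disagreement"),
   ("medium_consensus_disagreement", "Medium consensus disagreement"),
   ("low_consensus_disagreement", "Low consensus disagreement"),
   ("high_dispersion_caution", "Caution due to high dispersion"),
   ("high_macro_volatility", "High macro volatility"),
   ("very_high_macro_volatility", "Very high macro volatility"),
   ("low_macro_volatility", "Low macro volatility"),
   ("high_volatility_conservative", "Conservative due to volatility"),
   ("developed_market", "Developed market"),
   ("emerging_market", "Emerging market"),
   ("developed_market_bias", "DM bias applied"),
   ("commodity_exporter", "Commodity exporter"),
   ("high_china_exposure", "High China exposure"),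
   ("high_model_weight", "High model weight (α>0.7)"),
   ("high_consensus_weight", "High consensus weight (α<0.3)"),
   ("balanced_blending", "Balanced model-consensus blend"),
   ("high_dispersion_low_confidence", "High dispersion + low confidence → consensus"),
   ("persistent_large_gap", "Persistent large gap → reduced weight"),
   ("election_uncertainty", "Election uncertainty → conservative"),
   ("commodity_volatility", "Commodity volatility → conservative"),
   ("crisis_mode_detected", "Crisis mode → heavy consensus bias"),
   ("model_breakdown", "Model breakdown → minimal model weight"),
   ("consensus_breakdown", "Consensus breakdown → equal weighting"),
   ("em_stress_conditions", "EM stress → conservative blending"),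
   ("extreme_depression_cap", "Extreme recession forecast capped"),
   ("extreme_boom_cap", "Extreme growth forecast capped"),
   ("deep_recession_caution", "Deep recession → consensus preference"),
   ("high_growth_outlier", "High growth outlier → conservative")]

-- str.title(), exact on the ASCII domain: a letter starting a run of letters is uppercased,
-- later letters of the run lowercased, non-letters (uncased in ASCII) pass through and reset.
def pvTitleGo : List Char → Bool → List Char
  | [], _ => []
  | c :: cs, prevAlpha =>
    if PySem.Chars.isalpha c then
      (if prevAlpha then PySem.Chars.lowerChar c else PySem.Chars.upperChar c) :: pvTitleGo cs true
    else
      c :: pvTitleGo cs false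

def pvTitle (s : String) : String := String.ofList (pvTitleGo s.toList false)

-- reason.split('_')[-1]: split('_') is never empty, so [-1] always succeeds; getD "" is unreachable.
def pvLastPart (reason : String) : String :=
  (PySem.List.pyGet? ((PySem.Str.split? reason "_").getD []) (-1)).getD ""

def pvReadable (reason : String) : String :=
  if PySem.Str.startswith reason "raw_alpha_" then
    "Raw α=" ++ pvLastPart reason
  else if PySem.Str.startswith reason "min_bound_applied_" then
    "Min α=" ++ pvLastPart reason ++ " applied"
  else if PySem.Str.startswith reason "max_bound_applied_" then
    "Max α=" ++ pvLastPart reason ++ " applied"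
  else
    PySem.Dict.getD pvReasonMap reason (pvTitle (PySem.Str.replace reason "_" " "))

-- ===== PORT A =====
def format_reason_codes (reason_codes : List String) : String :=
  if reason_codes.isEmpty then "No specific reasoning available"
  else
    let readable := reason_codes.foldl (fun acc reason => acc ++ [pvReadable reason]) []
    let key := ([] : List String)
    let key := if readable.any (fun r => PySem.Str.isIn "ML model" r || PySem.Str.isIn "Raw α" r)
               then key ++ ["🤖 ML-driven"] else key
    let key := if readable.any (fun r => PySem.Str.isIn "fallback" (PySem.Str.lower r))
               then key ++ ["📋 Rule-based"] else key
    let key := if readable.any (fun r => PySem.Str.isIn "consensus" (PySem.Str.lower r))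
               then key ++ ["🎯 Consensus-aware"] else key
    let key := if readable.any (fun r => PySem.Str.isIn "volatility" (PySem.Str.lower r) || PySem.Str.isIn "conservative" (PySem.Str.lower r))
               then key ++ ["⚠️ Risk-adjusted"] else key
    let key := if readable.any (fun r => PySem.Str.isIn "crisis" (PySem.Str.lower r) || PySem.Str.isIn "breakdown" (PySem.Str.lower r) || PySem.Str.isIn "extreme" (PySem.Str.lower r) || PySem.Str.isIn "cap" (PySem.Str.lower r))
               then key ++ ["🚨 Guardrails"] else key
    let summary := if key.isEmpty then "Standard" else PySem.Str.join " + " key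
    let top := (readable.filter (fun r => !(["ML model", "fallback", "Raw α"].any (fun x => PySem.Str.isIn x r)))).take 3
    if top.isEmpty then summary else summary ++ ": " ++ PySem.Str.join ", " top

-- ===== PORT B =====
-- Source B's loop state: (ml, rule, cons, risk, guard, specifics)
def pvStep (acc : Bool × Bool × Bool × Bool × Bool × List String) (code : String) :
    Bool × Bool × Bool × Bool × Bool × List String :=
  let r := pvReadable code
  let low := PySem.Str.lower r
  (acc.1 || PySem.Str.isIn "ML model" r || PySem.Str.isIn "Raw α" r,
   acc.2.1 || PySem.Str.isIn "fallback" low,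
   acc.2.2.1 || PySem.Str.isIn "consensus" low,
   acc.2.2.2.1 || PySem.Str.isIn "volatility" low || PySem.Str.isIn "conservative" low,
   acc.2.2.2.2.1 || PySem.Str.isIn "crisis" low || PySem.Str.isIn "breakdown" low || PySem.Str.isIn "extreme" low || PySem.Str.isIn "cap" low,
   if !PySem.Str.isIn "ML model" r && !PySem.Str.isIn "fallback" r && !PySem.Str.isIn "Raw α" r
   then acc.2.2.2.2.2 ++ [r] else acc.2.2.2.2.2)

def format_reason_codes_alt (reason_codes : List String) : String :=
  if reason_codes.isEmpty then "No specific reasoning available"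
  else
    let st := reason_codes.foldl pvStep (false, false, false, false, false, [])
    let key := ([] : List String)
    let key := if st.1 then key ++ ["🤖 ML-driven"] else key
    let key := if st.2.1 then key ++ ["📋 Rule-based"] else key
    let key := if st.2.2.1 then key ++ ["🎯 Consensus-aware"] else key
    let key := if st.2.2.2.1 then key ++ ["⚠️ Risk-adjusted"] else key
    let key := if st.2.2.2.2.1 then key ++ ["🚨 Guardrails"] else key
    let summary := if key.isEmpty then "Standard" else PySem.Str.join " + " key
    let top := st.2.2.2.2.2.take 3
    if top.isEmpty then summary else summary ++ ": " ++ PySem.Str.join ", " top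

-- ===== PRECONDITION & SPEC =====
def Spec_format_reason_codes (reason_codes : List String) (out : String) : Prop := out = format_reason_codes_alt reason_codes
instance (reason_codes : List String) (out : String) : Decidable (Spec_format_reason_codes reason_codes out) := by unfold Spec_format_reason_codes; infer_instance

-- ===== CLAIM (what is proved, stated in full; the proofs are below) =====
def Claim_equal_format_reason_codes : Prop := ∀ (reason_codes : List String), Dom_format_reason_codes reason_codes → Spec_format_reason_codes reason_codes (format_reason_codes reason_codes)

-- ===== LEMMAS AND PROOFS =====

-- B's fused loop computes A's five `any` scans and A's specifics filter over the mapped list.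
theorem pvStep_foldl (l : List String) (a b c d e : Bool) (sp : List String) :
    l.foldl pvStep (a, b, c, d, e, sp) =
      (a || (l.map pvReadable).any (fun r => PySem.Str.isIn "ML model" r || PySem.Str.isIn "Raw α" r),
       b || (l.map pvReadable).any (fun r => PySem.Str.isIn "fallback" (PySem.Str.lower r)),
       c || (l.map pvReadable).any (fun r => PySem.Str.isIn "consensus" (PySem.Str.lower r)),
       d || (l.map pvReadable).any (fun r => PySem.Str.isIn "volatility" (PySem.Str.lower r) || PySem.Str.isIn "conservative" (PySem.Str.lower r)),
       e || (l.map pvReadable).any (fun r => PySem.Str.isIn "crisis" (PySem.Str.lower r) || PySem.Str.isIn "breakdown" (PySem.Str.lower r) || PySem.Str.isIn "extreme" (PySem.Str.lower r) || PySem.Str.isIn "cap" (PySem.Str.lower r)),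
       sp ++ (l.map pvReadable).filter (fun r => !PySem.Str.isIn "ML model" r && !PySem.Str.isIn "fallback" r && !PySem.Str.isIn "Raw α" r)) := by
  induction l generalizing a b c d e sp with
  | nil => simp
  | cons x xs ih =>
    simp only [List.foldl_cons, pvStep, List.map_cons, List.any_cons, List.filter_cons]
    rw [ih]
    cases hq : (!PySem.Str.isIn "ML model" (pvReadable x) && !PySem.Str.isIn "fallback" (pvReadable x) && !PySem.Str.isIn "Raw α" (pvReadable x)) <;>
      simp [Bool.or_assoc, List.append_assoc]

-- A's comprehension test and B's and-chain are the same Boolean.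
theorem pvSpecPred_eq (r : String) :
    (!(["ML model", "fallback", "Raw α"].any (fun x => PySem.Str.isIn x r))) =
      (!PySem.Str.isIn "ML model" r && !PySem.Str.isIn "fallback" r && !PySem.Str.isIn "Raw α" r) := by
  simp [List.any_cons, Bool.and_assoc]

-- ===== VERDICT (by name: the statement is the Claim_ definition above) =====
theorem format_reason_codes_spec : Claim_equal_format_reason_codes := by
  intro reason_codes _
  unfold Spec_format_reason_codes format_reason_codes format_reason_codes_alt
  by_cases h : reason_codes.isEmpty
  · simp [h]
  · simp only [h, Bool.false_eq_true, if_false]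
    rw [PySem.List.foldl_append_singleton_eq_map, pvStep_foldl]
    simp only [List.nil_append, Bool.false_or]
    rw [List.filter_congr (fun r _ => pvSpecPred_eq r)]
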